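-- pv_equiv track=rewrite | github.com/calpidisca/Reinforcement-Learning-Project | envs/utils.py | canonicalize_superperm
-- ===== SOURCE A (Python) =====
-- from typing import List, Tuple
--
-- def canonicalize_superperm(sequence: List[int], n: int) -> List[int]:
--     """
--     Canonicalize a superpermutation by relabeling to a standard form.
--
--     Approach:
--     1. Find the first contiguous block of length n that is a permutation of {1,...,n}
--     2. Use that block to define a relabeling mapping
--     3. Apply the mapping to the entire sequence
--
--     Args:
--         sequence: The superpermutation sequence
--         n: Alphabet size
--
--     Returns:
--         Canonicalized sequence
--     """
--     if len(sequence) < n: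
--         return sequence.copy()
--
--     # Find first permutation block
--     mapping = None
--     for i in range(len(sequence) - n + 1):
--         block = sequence[i:i+n]
--         # Check if block is a permutation of {1,...,n}
--         if set(block) == set(range(1, n + 1)) and len(block) == len(set(block)):
--             # Create mapping: block[j] -> j+1
--             mapping = {block[j]: j + 1 for j in range(n)}
--             break
--
--     # If no permutation block found, return original
--     if mapping is None:
--         return sequence.copy()
--
--     # Apply mapping
--     canonical = [mapping.get(symbol, symbol) for symbol in sequence]
--     return canonical
-- ===== SOURCE B (Python) =====
-- from typing import List
--
-- def canonicalize_superperm(sequence: List[int], n: int) -> List[int]: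
--     """One-pass sliding-window relabeling: find the first length-n window of
--     distinct symbols drawn from {1,...,n} (hence a permutation) by tracking the
--     last occurrence of each symbol, then relabel the whole sequence by it."""
--     L = len(sequence)
--     if L < n or n <= 0:
--         return list(sequence)
--     last = {}          # last index at which each symbol was seen
--     s = 0              # smallest j such that sequence[j..i] is distinct and within 1..n
--     start = -1
--     for i, x in enumerate(sequence):
--         if 1 <= x <= n:
--             p = last.get(x, -1)
--             if p + 1 > s:
--                 s = p + 1
--             last[x] = i
--         else:
--             s = i + 1
--         if i - s + 1 == n:
--             start = s
--             break
--     if start < 0: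
--         return list(sequence)
--     mapping = {sequence[start + j]: j + 1 for j in range(n)}
--     return [mapping.get(x, x) for x in sequence]
-- ===== Notes on version B (the rewrite author's own statement) =====
-- stated objective: faster
-- what changed: A rescans every length-n window and builds a fresh set per start to find the first permutation block; B finds the same block in one pass with a sliding window that tracks each symbol's last occurrence and the left edge of the current distinct in-range run.
import Mathlib
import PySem

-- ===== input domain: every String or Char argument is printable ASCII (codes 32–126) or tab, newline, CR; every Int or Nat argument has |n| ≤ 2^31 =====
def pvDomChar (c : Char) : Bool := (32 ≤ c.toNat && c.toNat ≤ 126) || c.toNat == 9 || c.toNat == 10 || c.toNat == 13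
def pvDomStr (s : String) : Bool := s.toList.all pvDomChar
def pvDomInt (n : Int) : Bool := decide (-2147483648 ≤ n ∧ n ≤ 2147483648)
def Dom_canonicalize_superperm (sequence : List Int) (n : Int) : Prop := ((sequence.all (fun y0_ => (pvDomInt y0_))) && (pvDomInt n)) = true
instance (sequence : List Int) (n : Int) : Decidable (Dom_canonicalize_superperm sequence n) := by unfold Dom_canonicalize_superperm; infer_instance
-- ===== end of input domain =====

-- B replaces A's per-start rescan of every length-n window by a one-pass sliding window that
-- tracks each symbol's last occurrence, finding the same first permutation block in one pass.

-- ===== PORT A =====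
-- A's per-window test: set(block) == set(range(1, n+1)) and len(block) == len(set(block))
def pvAtest (sequence : List Int) (n : Int) (i : Int) : Bool :=
  let block := PySem.List.slice sequence (some i) (some (i + n))
  PySem.Set.equal (PySem.Set.ofList block) (PySem.Set.ofList (PySem.List.pyRange 1 (n + 1))) &&
    (block.length == (PySem.Set.ofList block).length)

-- A's mapping comprehension: {block[j]: j + 1 for j in range(n)}
def pvAmap (sequence : List Int) (n : Int) (i : Int) : PySem.Dict Int Int :=
  let block := PySem.List.slice sequence (some i) (some (i + n))
  (PySem.List.pyRange 0 n).foldl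
    (fun d j => d.insert (PySem.List.pyGetD block j 0) (j + 1)) PySem.Dict.empty

-- A's for-loop `for i in range(len(sequence) - n + 1)` with break at the first hit,
-- as fuel recursion (fuel = number of remaining loop iterations, i = current index);
-- like Python's lazy range, it stops at the break instead of materialising the range
def pvAfind (sequence : List Int) (n : Int) : Nat → Int → Option (PySem.Dict Int Int)
  | 0, _ => none
  | fuel + 1, i =>
    if pvAtest sequence n i then some (pvAmap sequence n i)
    else pvAfind sequence n fuel (i + 1)

def canonicalize_superperm (sequence : List Int) (n : Int) : List Int :=
  if (sequence.length : Int) < n then sequence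
  else
    match pvAfind sequence n ((sequence.length : Int) - n + 1).toNat 0 with
    | none => sequence
    | some mapping => sequence.map (fun symbol => mapping.getD symbol symbol)

-- ===== PORT B =====
-- B's sliding-window loop over enumerate(sequence): `last` maps a symbol to its last index,
-- `s` is the left edge of the current distinct in-range run; first block start, or -1.
def pvBloop (n : Int) : List (Int × Int) → PySem.Dict Int Int → Int → Int
  | [], _, _ => -1
  | (i, x) :: rest, last, s =>
    if 1 ≤ x ∧ x ≤ n then
      let p := last.getD x (-1)
      let s' := if p + 1 > s then p + 1 else s
      if i - s' + 1 = n then s' else pvBloop n rest (last.insert x i) s'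
    else
      let s' := i + 1
      if i - s' + 1 = n then s' else pvBloop n rest last s'

-- B's mapping comprehension: {sequence[start + j]: j + 1 for j in range(n)}
def pvBmap (sequence : List Int) (n : Int) (start : Int) : PySem.Dict Int Int :=
  (PySem.List.pyRange 0 n).foldl
    (fun d j => d.insert (PySem.List.pyGetD sequence (start + j) 0) (j + 1)) PySem.Dict.empty

def canonicalize_superperm_alt (sequence : List Int) (n : Int) : List Int :=
  if (sequence.length : Int) < n ∨ n ≤ 0 then sequence
  else
    let start := pvBloop n (PySem.List.enumerate sequence 0) PySem.Dict.empty 0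
    if start < 0 then sequence
    else sequence.map (fun x => (pvBmap sequence n start).getD x x)

-- ===== PRECONDITION & SPEC =====
def Spec_canonicalize_superperm (sequence : List Int) (n : Int) (out : List Int) : Prop := out = canonicalize_superperm_alt sequence n
instance (sequence : List Int) (n : Int) (out : List Int) : Decidable (Spec_canonicalize_superperm sequence n out) := by unfold Spec_canonicalize_superperm; infer_instance

-- ===== CLAIM (what is proved, stated in full; the proofs are below) =====
def Claim_equal_canonicalize_superperm : Prop := ∀ (sequence : List Int) (n : Int), Dom_canonicalize_superperm sequence n → Spec_canonicalize_superperm sequence n (canonicalize_superperm sequence n)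

-- ===== LEMMAS AND PROOFS =====

-- The window sequence[j:k] (Nat indices)
def pvWin (sequence : List Int) (j k : Nat) : List Int := (sequence.drop j).take (k - j)

-- "the window sequence[j:k] consists of distinct symbols from 1..n"
def pvValid (sequence : List Int) (n : Int) (j k : Nat) : Prop :=
  (pvWin sequence j k).Nodup ∧ ∀ x ∈ pvWin sequence j k, 1 ≤ x ∧ x ≤ n

-- last index < k holding symbol v (-1 if none): the value B's `last` dict tracks
def pvLast (sequence : List Int) (v : Int) : Nat → Int
  | 0 => -1
  | k + 1 => if sequence.getD k 0 = v then (k : Int) else pvLast sequence v k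

lemma pvWin_self (seq : List Int) (n : Int) (j : Nat) : pvValid seq n j j := by
  constructor <;> simp [pvWin]

lemma pvWin_mem (seq : List Int) (j k : Nat) (hk : k ≤ seq.length) (x : Int) :
    x ∈ pvWin seq j k ↔ ∃ m : Nat, j ≤ m ∧ m < k ∧ seq.getD m 0 = x := by
  unfold pvWin
  rw [List.mem_iff_getElem]
  constructor
  · rintro ⟨i, hi, hei⟩
    have hlen : i < k - j ∧ i < seq.length - j := by
      simp only [List.length_take, List.length_drop] at hi; omega
    refine ⟨j + i, by omega, by omega, ?_⟩
    have hji : j + i < seq.length := by omega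
    rw [List.getD_eq_getElem _ _ hji, ← hei, List.getElem_take, List.getElem_drop]
  · rintro ⟨m, hjm, hmk, hx⟩
    have hmL : m < seq.length := by omega
    refine ⟨m - j, by simp only [List.length_take, List.length_drop]; omega, ?_⟩
    rw [List.getElem_take, List.getElem_drop,
      ← List.getD_eq_getElem seq 0 (show j + (m - j) < seq.length by omega)]
    have hje : j + (m - j) = m := by omega
    rw [hje, hx]

lemma pvWin_succ (seq : List Int) (j k : Nat) (hjk : j ≤ k) (hkL : k < seq.length) :
    pvWin seq j (k + 1) = pvWin seq j k ++ [seq.getD k 0] := by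
  unfold pvWin
  have h1 : k + 1 - j = (k - j) + 1 := by omega
  rw [h1, List.take_add_one]
  have h2 : (seq.drop j)[k - j]? = some (seq.getD k 0) := by
    rw [List.getElem?_drop]
    have h3 : j + (k - j) = k := by omega
    rw [h3, List.getElem?_eq_getElem hkL, List.getD_eq_getElem _ _ hkL]
  rw [h2]
  rfl

lemma pvValid_succ_iff (seq : List Int) (n : Int) {j k : Nat} (hjk : j ≤ k) (hkL : k < seq.length) :
    pvValid seq n j (k + 1) ↔
      pvValid seq n j k ∧ (1 ≤ seq.getD k 0 ∧ seq.getD k 0 ≤ n) ∧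
        ∀ m : Nat, j ≤ m → m < k → seq.getD m 0 ≠ seq.getD k 0 := by
  unfold pvValid
  rw [pvWin_succ seq j k hjk hkL]
  constructor
  · rintro ⟨hnd, hm⟩
    rw [List.nodup_append] at hnd
    refine ⟨⟨hnd.1, fun x hx => hm x (List.mem_append_left _ hx)⟩,
      hm _ (List.mem_append_right _ (List.mem_singleton_self _)), ?_⟩
    intro m hjm hmk heq
    have hmem : seq.getD k 0 ∈ pvWin seq j k := by
      rw [pvWin_mem seq j k (by omega)]
      exact ⟨m, hjm, hmk, heq⟩
    exact hnd.2.2 _ hmem _ (List.mem_singleton_self _) rfl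
  · rintro ⟨⟨hnd, hm⟩, hr, hfresh⟩
    rw [List.nodup_append]
    refine ⟨⟨hnd, List.nodup_singleton _, ?_⟩, ?_⟩
    · intro a ha b hb
      rw [List.mem_singleton] at hb
      subst hb
      rw [pvWin_mem seq j k (by omega)] at ha
      obtain ⟨m, hjm, hmk, heq⟩ := ha
      rw [← heq]
      exact hfresh m hjm hmk
    · intro x hx
      rcases List.mem_append.mp hx with h | h
      · exact hm x h
      · rw [List.mem_singleton] at h; subst h; exact hr

lemma pvLast_lt (seq : List Int) (v : Int) (k : Nat) : pvLast seq v k < (k : Int) := by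
  induction k with
  | zero => norm_num [pvLast]
  | succ k ih =>
    unfold pvLast
    split
    · push_cast; omega
    · push_cast; omega

lemma pvLast_lt_iff (seq : List Int) (v : Int) (k : Nat) (j : Nat) :
    pvLast seq v k < (j : Int) ↔ ∀ m : Nat, j ≤ m → m < k → seq.getD m 0 ≠ v := by
  induction k with
  | zero =>
    simp only [pvLast]
    constructor
    · intro _ m _ hm
      exact absurd hm (Nat.not_lt_zero m)
    · intro _
      omega
  | succ k ih =>
    unfold pvLast
    split
    · rename_i hk
      constructor
      · intro h m hjm hmk _
        omega
      · intro h
        by_contra hlt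
        have hjk : j ≤ k := by omega
        exact h k hjk (Nat.lt_succ_self k) hk
    · rename_i hk
      rw [ih]
      constructor
      · intro h m hjm hmk
        rcases Nat.lt_succ_iff_lt_or_eq.mp hmk with h' | h'
        · exact h m hjm h'
        · subst h'; exact hk
      · intro h m hjm hmk
        exact h m hjm (by omega)

-- set(l) having as many elements as l forces l to be duplicate-free
lemma pvLen_nodup (l : List Int) (h : l.length = (PySem.Set.ofList l).length) : l.Nodup := by
  have h1 : (PySem.Set.ofList l).toFinset = l.toFinset := by
    ext x
    simp [PySem.Set.mem_ofList]
  have h2 : l.toFinset.card = (PySem.Set.ofList l).length := by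
    rw [← h1]
    exact List.toFinset_card_of_nodup (PySem.Set.nodup_ofList l)
  have h3 : l.dedup.length = l.length := by
    rw [← List.card_toFinset, h2, ← h]
  have h4 : l.dedup = l := (List.dedup_sublist l).eq_of_length h3
  rw [← h4]
  exact List.nodup_dedup l

-- n distinct values in {1,...,n} are all of {1,...,n}
lemma pvPigeon (l : List Int) (n : Int) (hd : l.Nodup)
    (hlen : (l.length : Int) = n) (hmem : ∀ x ∈ l, 1 ≤ x ∧ x ≤ n)
    (x : Int) (h1 : 1 ≤ x) (h2 : x ≤ n) : x ∈ l := by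
  have hsub : l.toFinset ⊆ Finset.Icc 1 n := by
    intro y hy
    rw [List.mem_toFinset] at hy
    rw [Finset.mem_Icc]
    exact hmem y hy
  have hcard : (Finset.Icc (1 : Int) n).card = l.toFinset.card := by
    rw [Int.card_Icc, List.toFinset_card_of_nodup hd]
    omega
  have hicc := Finset.eq_of_subset_of_card_le hsub (le_of_eq hcard)
  have hx : x ∈ l.toFinset := by
    rw [hicc, Finset.mem_Icc]; exact ⟨h1, h2⟩
  rwa [List.mem_toFinset] at hx

-- A's test on the window starting at j is exactly pvValid
lemma pvAtest_iff (seq : List Int) (n : Int) (hn : 0 < n) (j : Nat)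
    (hj : j + n.toNat ≤ seq.length) :
    pvAtest seq n (j : Int) = true ↔ pvValid seq n j (j + n.toNat) := by
  have hnN : ((n.toNat : Nat) : Int) = n := Int.toNat_of_nonneg hn.le
  have hblock : PySem.List.slice seq (some (j : Int)) (some ((j : Int) + n)) =
      pvWin seq j (j + n.toNat) := by
    rw [← hnN, PySem.List.slice_natCast_add]
    unfold pvWin
    congr 1
    omega
  have hlen : (pvWin seq j (j + n.toNat)).length = n.toNat := by
    unfold pvWin
    simp only [List.length_take, List.length_drop]
    omega
  simp only [pvAtest, hblock, Bool.and_eq_true, beq_iff_eq]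
  rw [PySem.Set.equal_iff]
  constructor
  · rintro ⟨hequal, hlens⟩
    have hnd : (pvWin seq j (j + n.toNat)).Nodup := pvLen_nodup _ hlens
    refine ⟨hnd, ?_⟩
    intro x hx
    have hxr := (hequal x).mp (by rw [PySem.Set.mem_ofList]; exact hx)
    rw [PySem.Set.mem_ofList, PySem.List.mem_pyRange_one] at hxr
    omega
  · rintro ⟨hnd, hm⟩
    have hself : PySem.Set.ofList (pvWin seq j (j + n.toNat)) = pvWin seq j (j + n.toNat) :=
      PySem.Set.ofList_eq_self_of_nodup _ hnd
    constructor
    · intro x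
      rw [PySem.Set.mem_ofList, PySem.Set.mem_ofList, PySem.List.mem_pyRange_one]
      constructor
      · intro hx
        have := hm x hx
        omega
      · intro hx
        exact pvPigeon _ n hnd (by rw [hlen]; exact hnN) hm x (by omega) (by omega)
    · rw [hself]

-- A's loop returns none when the test never holds in the remaining iterations
lemma pvAfind_none (seq : List Int) (n : Int) :
    ∀ (fuel : Nat) (i : Int), (∀ t, i ≤ t → t < i + (fuel : Int) → pvAtest seq n t = false) →
      pvAfind seq n fuel i = none := by
  intro fuel
  induction fuel with
  | zero => intro i _; rfl
  | succ fuel ih =>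
    intro i hp
    rw [pvAfind]
    have hpa : pvAtest seq n i = false := hp i le_rfl (by push_cast; omega)
    rw [if_neg (by simp [hpa])]
    exact ih (i + 1) (fun t h1 h2 => hp t (by omega) (by push_cast at h2 ⊢; omega))

-- A's loop returns the mapping of the first index where the test holds
lemma pvAfind_some (seq : List Int) (n : Int) (v : Int) (hv : pvAtest seq n v = true) :
    ∀ (fuel : Nat) (i : Int), i ≤ v → v < i + (fuel : Int) →
      (∀ t, i ≤ t → t < v → pvAtest seq n t = false) →
      pvAfind seq n fuel i = some (pvAmap seq n v) := by
  intro fuel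
  induction fuel with
  | zero =>
    intro i h1 h2 _
    push_cast at h2
    omega
  | succ fuel ih =>
    intro i h1 h2 hmin
    rw [pvAfind]
    rcases eq_or_lt_of_le h1 with he | hlt
    · subst he
      rw [if_pos hv]
    · have hpa : pvAtest seq n i = false := hmin i le_rfl hlt
      rw [if_neg (by simp [hpa])]
      exact ih (i + 1) (by omega) (by push_cast at h2 ⊢; omega)
        (fun t ht1 ht2 => hmin t (by omega) ht2)

-- A's loop result is always none or the mapping of some index
lemma pvAfind_shape (seq : List Int) (n : Int) :
    ∀ (fuel : Nat) (i : Int), pvAfind seq n fuel i = none ∨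
      ∃ v, pvAfind seq n fuel i = some (pvAmap seq n v) := by
  intro fuel
  induction fuel with
  | zero => intro i; exact Or.inl rfl
  | succ fuel ih =>
    intro i
    rw [pvAfind]
    by_cases h : pvAtest seq n i = true
    · rw [if_pos h]
      exact Or.inr ⟨i, rfl⟩
    · rw [if_neg h]
      exact ih (i + 1)

-- the two mapping dicts are built from the same key/value pairs
lemma pvAmap_eq_pvBmap (seq : List Int) (n : Int) (hn : 0 < n) (j : Nat)
    (hj : j + n.toNat ≤ seq.length) :
    pvAmap seq n (j : Int) = pvBmap seq n (j : Int) := by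
  have hnN : ((n.toNat : Nat) : Int) = n := Int.toNat_of_nonneg hn.le
  simp only [pvAmap, pvBmap]
  apply PySem.List.foldl_congr_mem
  intro acc jj hjj
  rw [PySem.List.mem_pyRange_one] at hjj
  obtain ⟨jn, rfl⟩ : ∃ jn : Nat, jj = (jn : Int) :=
    ⟨jj.toNat, (Int.toNat_of_nonneg hjj.1).symm⟩
  have hjn : jn < n.toNat := by omega
  have hval : PySem.List.pyGetD (PySem.List.slice seq (some (j : Int)) (some ((j : Int) + n)))
      (jn : Int) 0 = PySem.List.pyGetD seq ((j : Int) + (jn : Int)) 0 := by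
    rw [← hnN, PySem.List.slice_natCast_add]
    have hc : (j : Int) + (jn : Int) = ((j + jn : Nat) : Int) := by push_cast; ring
    rw [hc, PySem.List.pyGetD_natCast, PySem.List.pyGetD_natCast]
    have hb : jn < (List.take n.toNat (seq.drop j)).length := by
      simp only [List.length_take, List.length_drop]; omega
    have hs : j + jn < seq.length := by omega
    rw [List.getD_eq_getElem _ _ hb, List.getD_eq_getElem _ _ hs, List.getElem_take,
      List.getElem_drop]
  rw [hval]

-- main loop invariant: B's pvBloop returns the first valid window start (or -1)
lemma pvBloop_spec_aux (seq : List Int) (n : Int) (hn : 0 < n) :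
    ∀ (fuel k : Nat) (last : PySem.Dict Int Int) (s : Int),
      seq.length - k = fuel → k ≤ seq.length →
      (∀ v : Int, 1 ≤ v → v ≤ n → last.getD v (-1) = pvLast seq v k) →
      0 ≤ s → s ≤ (k : Int) →
      (∀ j : Nat, j ≤ k → (pvValid seq n j k ↔ s ≤ (j : Int))) →
      ((k : Int) - s ≤ n - 1) →
      (∀ j : Nat, j + n.toNat ≤ k → ¬ pvValid seq n j (j + n.toNat)) →
      (pvBloop n (PySem.List.enumerate (seq.drop k) k) last s = -1 ∧
        ∀ j : Nat, j + n.toNat ≤ seq.length → ¬ pvValid seq n j (j + n.toNat)) ∨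
      (∃ js : Nat, pvBloop n (PySem.List.enumerate (seq.drop k) k) last s = (js : Int) ∧
        js + n.toNat ≤ seq.length ∧ pvValid seq n js (js + n.toNat) ∧
        ∀ j : Nat, j < js → ¬ pvValid seq n j (j + n.toNat)) := by
  intro fuel
  induction fuel with
  | zero =>
    intro k last s hf hkL _ _ _ _ _ hdone
    have hkeq : k = seq.length := by omega
    subst hkeq
    rw [List.drop_length, PySem.List.enumerate_nil]
    exact Or.inl ⟨rfl, hdone⟩
  | succ fuel ih =>
    intro k last s hf hkL hlast hs0 hsk hchar hlen hdone
    have hkL' : k < seq.length := by omega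
    set x := seq.getD k 0 with hxdef
    have hdropk : seq.drop k = x :: seq.drop (k + 1) := by
      rw [List.drop_eq_getElem_cons hkL']
      rw [hxdef, List.getD_eq_getElem _ _ hkL']
    rw [hdropk, PySem.List.enumerate_cons]
    have hcast : (k : Int) + 1 = ((k + 1 : Nat) : Int) := by push_cast; ring
    have hN1 : 1 ≤ n.toNat := by omega
    by_cases hx : 1 ≤ x ∧ x ≤ n
    · -- in-range symbol
      have hp : last.getD x (-1) = pvLast seq x k := hlast x hx.1 hx.2
      simp only [pvBloop, if_pos hx, hp]
      set s' := if pvLast seq x k + 1 > s then pvLast seq x k + 1 else s with hs'def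
      have hpk : pvLast seq x k < (k : Int) := pvLast_lt seq x k
      have hs'0 : 0 ≤ s' := by rw [hs'def]; split <;> omega
      have hs'k : s' ≤ (k : Int) + 1 := by rw [hs'def]; split <;> omega
      have hss' : s ≤ s' := by rw [hs'def]; split <;> omega
      have hchar' : ∀ j : Nat, j ≤ k + 1 → (pvValid seq n j (k + 1) ↔ s' ≤ (j : Int)) := by
        intro j hj
        by_cases hjk : j ≤ k
        · rw [pvValid_succ_iff seq n hjk hkL']
          constructor
          · rintro ⟨hv, _, hfresh⟩
            have h1 : s ≤ (j : Int) := (hchar j hjk).mp hv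
            have h2 : pvLast seq x k < (j : Int) := (pvLast_lt_iff seq x k j).mpr hfresh
            rw [hs'def]; split <;> omega
          · intro hs'j
            have h1 : s ≤ (j : Int) := by rw [hs'def] at hs'j; split at hs'j <;> omega
            have h2 : pvLast seq x k < (j : Int) := by
              rw [hs'def] at hs'j; split at hs'j <;> omega
            exact ⟨(hchar j hjk).mpr h1, hx, (pvLast_lt_iff seq x k j).mp h2⟩
        · have hj1 : j = k + 1 := by omega
          subst hj1
          exact iff_of_true (pvWin_self seq n (k + 1)) (by push_cast at hs'k ⊢; omega)
      have hlast' : ∀ v : Int, 1 ≤ v → v ≤ n →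
          (last.insert x (k : Int)).getD v (-1) = pvLast seq v (k + 1) := by
        intro v h1 h2
        rw [PySem.Dict.getD_insert, pvLast]
        by_cases hvx : v = x
        · rw [if_pos hvx, if_pos (by rw [hvx])]
        · rw [if_neg hvx, if_neg (fun h => hvx h.symm)]
          exact hlast v h1 h2
      by_cases hbr : (k : Int) - s' + 1 = n
      · rw [if_pos hbr]
        right
        have hkLc : (k : Int) < (seq.length : Int) := by exact_mod_cast hkL'
        refine ⟨s'.toNat, (Int.toNat_of_nonneg hs'0).symm, by omega, ?_, ?_⟩
        · have heq : s'.toNat + n.toNat = k + 1 := by omega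
          rw [heq]
          exact (hchar' s'.toNat (by omega)).mpr (by omega)
        · intro j hjlt
          exact hdone j (by omega)
      · rw [if_neg hbr, hcast]
        refine ih (k + 1) (last.insert x (k : Int)) s' (by omega) (by omega) hlast' hs'0
          (by push_cast; omega) hchar' (by push_cast; omega) ?_
        intro j hj
        rcases Nat.lt_or_ge (j + n.toNat) (k + 1) with h | h
        · exact hdone j (by omega)
        · have hje : j + n.toNat = k + 1 := by omega
          intro hv
          rw [hje] at hv
          have hs'j : s' ≤ (j : Int) := (hchar' j (by omega)).mp hv
          omega
    · -- out-of-range symbol: the run restarts at k + 1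
      simp only [pvBloop, if_neg hx]
      have hbr : ¬ ((k : Int) - ((k : Int) + 1) + 1 = n) := by omega
      rw [if_neg hbr, hcast]
      have hchar' : ∀ j : Nat, j ≤ k + 1 →
          (pvValid seq n j (k + 1) ↔ (k : Int) + 1 ≤ (j : Int)) := by
        intro j hj
        by_cases hjk : j ≤ k
        · constructor
          · intro hv
            rw [pvValid_succ_iff seq n hjk hkL'] at hv
            exact absurd hv.2.1 hx
          · intro h
            exfalso
            push_cast at h
            omega
        · have hj1 : j = k + 1 := by omega
          subst hj1
          exact iff_of_true (pvWin_self seq n (k + 1)) (by push_cast; omega)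
      have hlast' : ∀ v : Int, 1 ≤ v → v ≤ n → last.getD v (-1) = pvLast seq v (k + 1) := by
        intro v h1 h2
        rw [pvLast]
        rw [if_neg (fun h => hx (by rw [hxdef, h]; exact ⟨h1, h2⟩))]
        exact hlast v h1 h2
      refine ih (k + 1) last ((k : Int) + 1) (by omega) (by omega) hlast' (by omega)
        (by push_cast; omega) hchar' (by push_cast; omega) ?_
      intro j hj
      rcases Nat.lt_or_ge (j + n.toNat) (k + 1) with h | h
      · exact hdone j (by omega)
      · have hje : j + n.toNat = k + 1 := by omega
        intro hv
        rw [hje] at hv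
        have := (hchar' j (by omega)).mp hv
        omega

-- the n ≤ 0 case: A's first window is empty, the mapping is empty, the output is the input
lemma pvA_nonpos (seq : List Int) (n : Int) (hn : n ≤ 0) :
    canonicalize_superperm seq n = seq := by
  unfold canonicalize_superperm
  rw [if_neg (by omega)]
  have hmap : ∀ i : Int, pvAmap seq n i = PySem.Dict.empty := by
    intro i
    simp only [pvAmap]
    rw [PySem.List.pyRange_one_eq_nil hn]
    rfl
  rcases pvAfind_shape seq n ((seq.length : Int) - n + 1).toNat 0 with h | ⟨v, h⟩
  · rw [h]
  · rw [h, hmap v]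
    simp [PySem.Dict.getD_empty]

-- ===== VERDICT (by name: the statement is the Claim_ definition above) =====
theorem canonicalize_superperm_spec : Claim_equal_canonicalize_superperm := by
  unfold Claim_equal_canonicalize_superperm
  intro seq n _
  unfold Spec_canonicalize_superperm
  by_cases hLn : (seq.length : Int) < n
  · unfold canonicalize_superperm canonicalize_superperm_alt
    rw [if_pos hLn, if_pos (Or.inl hLn)]
  by_cases hn0 : n ≤ 0
  · rw [pvA_nonpos seq n hn0]
    unfold canonicalize_superperm_alt
    rw [if_pos (Or.inr hn0)]
  replace hn0 : 0 < n := by omega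
  have hnN : ((n.toNat : Nat) : Int) = n := Int.toNat_of_nonneg hn0.le
  have hmain := pvBloop_spec_aux seq n hn0 seq.length 0 PySem.Dict.empty 0 (by omega) (by omega)
    (fun v _ _ => by rw [PySem.Dict.getD_empty]; rfl)
    le_rfl (by omega)
    (fun j hj => by
      have hj0 : j = 0 := by omega
      subst hj0
      exact iff_of_true (pvWin_self seq n 0) (by omega))
    (by omega)
    (fun j hj => absurd hj (by omega))
  simp only [List.drop_zero, Nat.cast_zero] at hmain
  unfold canonicalize_superperm canonicalize_superperm_alt
  rw [if_neg hLn, if_neg (by rw [not_or]; exact ⟨by omega, by omega⟩)]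
  rcases hmain with ⟨hB, hnone⟩ | ⟨js, hB, hjs, hvalid, hmin⟩
  · have hfind : pvAfind seq n ((seq.length : Int) - n + 1).toNat 0 = none := by
      apply pvAfind_none
      intro t h0 ht
      have hji : t.toNat + n.toNat ≤ seq.length := by omega
      by_contra hc
      rw [Bool.not_eq_false] at hc
      have hc' : pvAtest seq n ((t.toNat : Nat) : Int) = true := by
        rwa [Int.toNat_of_nonneg h0]
      exact hnone t.toNat hji ((pvAtest_iff seq n hn0 t.toNat hji).mp hc')
    rw [hfind]
    simp only [hB]
    norm_num
  · have hfind : pvAfind seq n ((seq.length : Int) - n + 1).toNat 0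
        = some (pvAmap seq n (js : Int)) := by
      apply pvAfind_some seq n (js : Int) ((pvAtest_iff seq n hn0 js hjs).mpr hvalid)
      · omega
      · omega
      · intro t h0 ht
        have hji : t.toNat + n.toNat ≤ seq.length := by omega
        by_contra hc
        rw [Bool.not_eq_false] at hc
        have hc' : pvAtest seq n ((t.toNat : Nat) : Int) = true := by
          rwa [Int.toNat_of_nonneg h0]
        exact hmin t.toNat (by omega) ((pvAtest_iff seq n hn0 t.toNat hji).mp hc')
    rw [hfind]
    simp only [hB]
    rw [if_neg (by omega : ¬ ((js : Int) < 0))]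
    rw [pvAmap_eq_pvBmap seq n hn0 js hjs]
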